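-- pv_equiv track=rewrite | github.com/CAMeL-Lab/gender-rewriting | rewrite/multi-step/utils/data_utils.py | collate
-- ===== SOURCE A (Python) =====
-- def collate(raw_data_lines):
--     """
--     Args:
--         - raw_data_lines (list): Sentences are separated by a new line.
--     Returns:
--         - tokens (list of list of str)
--         - tags (list of list of str)
--     """
--     sent_tokens = []
--     all_tokens = []
--     sent_tags = []
--     all_tags = []
--     for i, ex in enumerate(raw_data_lines):
--         ex = ex.strip().split()
--         if len(ex) == 0:
--             all_tokens.append(sent_tokens)
--             all_tags.append(sent_tags)
--             sent_tokens = []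
--             sent_tags = []
--
--         elif len(ex) == 2:
--             token, tag = ex[0], ex[1]
--             sent_tokens.append(token)
--             sent_tags.append(tag)
--
--         elif len(ex) == 1: # if there's no tag during test time
--             token, tag = ex[0], None
--             sent_tokens.append(token)
--             sent_tags.append(tag)
--
--     # adding the last sentence info
--     # all_tokens.append(sent_tokens)
--     # all_tags.append(sent_tags)
--     return all_tokens, all_tags
-- ===== SOURCE B (Python) =====
-- def collate(raw_data_lines):
--     # Phase 1: split into segments of field-lists; each blank line flushes the
--     # current segment; the trailing segment (never flushed by A) is dropped.
--     segments = []
--     cur = []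
--     for line in raw_data_lines:
--         fields = line.strip().split()
--         if not fields:
--             segments.append(cur)
--             cur = []
--         else:
--             cur.append(fields)
--     # Phase 2: per segment, parse token/tag columns, skipping >2-field lines.
--     all_tokens = [[f[0] for f in seg if len(f) <= 2] for seg in segments]
--     all_tags = [[f[1] if len(f) == 2 else None for f in seg if len(f) <= 2]
--                 for seg in segments]
--     return all_tokens, all_tags
-- ===== Notes on version B (the rewrite author's own statement) =====
-- stated objective: alternative
-- what changed: Replaces A's single-pass four-accumulator state machine by a two-phase decomposition: first group the lines into blank-separated segments of field-lists (dropping the trailing never-flushed segment), then map each segment to its token and tag columns with a comprehension.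
import Mathlib
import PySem

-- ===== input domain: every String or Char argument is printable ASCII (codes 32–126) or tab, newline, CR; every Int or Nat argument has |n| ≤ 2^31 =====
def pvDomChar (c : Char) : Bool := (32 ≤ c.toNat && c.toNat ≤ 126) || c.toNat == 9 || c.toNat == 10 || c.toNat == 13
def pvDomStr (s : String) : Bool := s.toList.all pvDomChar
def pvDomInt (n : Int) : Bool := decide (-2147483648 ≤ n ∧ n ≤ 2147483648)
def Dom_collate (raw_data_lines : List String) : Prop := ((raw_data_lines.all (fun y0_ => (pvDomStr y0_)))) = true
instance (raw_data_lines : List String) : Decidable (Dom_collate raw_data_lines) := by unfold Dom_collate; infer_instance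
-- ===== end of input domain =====

-- B replaces A's single-pass four-accumulator state machine by a two-phase
-- decomposition (segment the lines at blanks, then parse each segment); same cost.


-- ===== PORT A =====
-- A's loop body: one step of the four-accumulator state machine
def collateStepA
    (st : List String × List (List String) × List (Option String) × List (List (Option String)))
    (line : String) :
    List String × List (List String) × List (Option String) × List (List (Option String)) :=
  let ex := PySem.Str.split₀ (PySem.Str.strip line)
  let (sentTokens, allTokens, sentTags, allTags) := st
  if ex.length = 0 then
    ([], allTokens ++ [sentTokens], [], allTags ++ [sentTags])
  else if ex.length = 2 then
    (sentTokens ++ [PySem.List.pyGetD ex 0 ""], allTokens,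
     sentTags ++ [some (PySem.List.pyGetD ex 1 "")], allTags)
  else if ex.length = 1 then
    (sentTokens ++ [PySem.List.pyGetD ex 0 ""], allTokens,
     sentTags ++ [none], allTags)
  else st

def collate (raw_data_lines : List String) : List (List String) × List (List (Option String)) :=
  let fin := raw_data_lines.foldl collateStepA ([], [], [], [])
  (fin.2.1, fin.2.2.2)

-- ===== PORT B =====
-- phase 1 loop body: flush on blank, else extend the current segment
def collateStepB (st : List (List (List String)) × List (List String)) (line : String) :
    List (List (List String)) × List (List String) :=
  let fields := PySem.Str.split₀ (PySem.Str.strip line)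
  if fields.isEmpty then (st.1 ++ [st.2], []) else (st.1, st.2 ++ [fields])

-- phase 2: token column of a segment
def segTokens (seg : List (List String)) : List String :=
  (seg.filter (fun f => decide (f.length ≤ 2))).map (fun f => PySem.List.pyGetD f 0 "")

-- phase 2: tag column of a segment
def segTags (seg : List (List String)) : List (Option String) :=
  (seg.filter (fun f => decide (f.length ≤ 2))).map
    (fun f => if f.length = 2 then some (PySem.List.pyGetD f 1 "") else none)

def collate_alt (raw_data_lines : List String) : List (List String) × List (List (Option String)) :=
  let fin := raw_data_lines.foldl collateStepB ([], [])
  (fin.1.map segTokens, fin.1.map segTags)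

-- ===== PRECONDITION & SPEC =====
def Spec_collate (raw_data_lines : List String) (out : List (List String) × List (List (Option String))) : Prop := out = collate_alt raw_data_lines
instance (raw_data_lines : List String) (out : List (List String) × List (List (Option String))) : Decidable (Spec_collate raw_data_lines out) := by unfold Spec_collate; infer_instance

-- ===== CLAIM (what is proved, stated in full; the proofs are below) =====
def Claim_equal_collate : Prop := ∀ (raw_data_lines : List String), Dom_collate raw_data_lines → Spec_collate raw_data_lines (collate raw_data_lines)

-- ===== LEMMAS AND PROOFS =====

-- loop invariant: A's four accumulators are the columns of B's segment state
theorem collate_loop_inv (lines : List String) (segs : List (List (List String)))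
    (cur : List (List String)) :
    lines.foldl collateStepA (segTokens cur, segs.map segTokens, segTags cur, segs.map segTags)
      = (segTokens (lines.foldl collateStepB (segs, cur)).2,
         (lines.foldl collateStepB (segs, cur)).1.map segTokens,
         segTags (lines.foldl collateStepB (segs, cur)).2,
         (lines.foldl collateStepB (segs, cur)).1.map segTags) := by
  induction lines generalizing segs cur with
  | nil => simp
  | cons line rest ih =>
    simp only [List.foldl_cons]
    have hstep :
        collateStepA (segTokens cur, segs.map segTokens, segTags cur, segs.map segTags) line
          = (segTokens (collateStepB (segs, cur) line).2,
             (collateStepB (segs, cur) line).1.map segTokens,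
             segTags (collateStepB (segs, cur) line).2,
             (collateStepB (segs, cur) line).1.map segTags) := by
      simp only [collateStepA, collateStepB]
      generalize PySem.Str.split₀ (PySem.Str.strip line) = ex
      cases ex with
      | nil => simp [segTokens, segTags]
      | cons t more =>
        cases more with
        | nil => simp [segTokens, segTags, PySem.List.pyGetD]
        | cons g more2 =>
          cases more2 with
          | nil => simp [segTokens, segTags, PySem.List.pyGetD]
          | cons u more3 => simp [segTokens, segTags]
    rw [hstep]
    have := ih (collateStepB (segs, cur) line).1 (collateStepB (segs, cur) line).2
    simpa using this

-- ===== VERDICT (by name: the statement is the Claim_ definition above) =====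
theorem collate_spec : Claim_equal_collate := by
  intro raw _
  unfold Spec_collate collate collate_alt
  have h := collate_loop_inv raw [] []
  simp only [segTokens, segTags, List.filter_nil, List.map_nil] at h ⊢
  rw [show ([] : List String) = segTokens [] by simp [segTokens],
      show ([] : List (Option String)) = segTags [] by simp [segTags]] at *
  simp [h]
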